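-- pv_equiv track=rewrite | github.com/gkdso738/CS-challenge | codeitsuisse/routes/olympiad_of_babylon.py | solve
-- ===== SOURCE A (Python) =====
-- def solve(books, days):
--     books.sort()
--     days.sort()
--     cur = 0
--     sum = 0
--     while cur < len(books):
--         if days == []: return cur
--         if sum + books[cur] > days[len(days)-1]:
--             for j in range(len(days)):
--                 if days[j] >= sum:
--                     days = days[:j] + days[j+1:]
--                     break
--             sum = 0
--         sum += books[cur]
--         if days == [] or sum > days[len(days)-1]: return cur
--         cur += 1
--     return cur
-- ===== SOURCE B (Python) =====
-- # B: same greedy, but the removed day is found by hand-written binary search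
-- # (bisect_left on the sorted day list) instead of A's linear scan; days are
-- # popped from a working copy. Like A, books and days are sorted in place.
-- def _bisect_left(a, x):
--     lo, hi = 0, len(a)
--     while lo < hi:
--         mid = (lo + hi) // 2
--         if a[mid] < x:
--             lo = mid + 1
--         else:
--             hi = mid
--     return lo
--
-- def solve(books, days):
--     books.sort()
--     days.sort()
--     if not days:
--         return 0
--     d = list(days)
--     s = 0
--     for n, b in enumerate(books):
--         if s + b > d[-1]:
--             i = _bisect_left(d, s)
--             if i < len(d):
--                 del d[i]
--             s = 0
--         s += b
--         if not d or s > d[-1]: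
--             return n
--     return len(books)
-- ===== Notes on version B (the rewrite author's own statement) =====
-- stated objective: faster
-- what changed: The day holding the current group is located by binary search (hand-written bisect_left) on the sorted day list and removed by a single pop, replacing A's Python-level linear index scan with slice concatenation.
import Mathlib
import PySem

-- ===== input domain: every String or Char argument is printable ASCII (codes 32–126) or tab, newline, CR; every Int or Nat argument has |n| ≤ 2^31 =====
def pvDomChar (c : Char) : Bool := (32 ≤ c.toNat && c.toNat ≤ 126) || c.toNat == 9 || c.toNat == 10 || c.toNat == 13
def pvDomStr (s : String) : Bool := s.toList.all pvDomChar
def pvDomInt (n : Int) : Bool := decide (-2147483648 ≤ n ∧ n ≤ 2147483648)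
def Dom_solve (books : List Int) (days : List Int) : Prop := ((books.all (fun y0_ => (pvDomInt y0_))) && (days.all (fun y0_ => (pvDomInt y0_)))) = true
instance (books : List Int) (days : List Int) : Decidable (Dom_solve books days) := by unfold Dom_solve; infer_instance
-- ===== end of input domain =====

-- B replaces A's linear scan for the first day ≥ sum by a hand-written binary search;
-- equivalence is about the return value (both Pythons sort books and days in place).

-- ===== PORT A =====
-- the `for j in range(len(days))` loop: remove the first day ≥ s (days[:j] + days[j+1:])
def removeDayA (days : List Int) (s : Int) : List Int :=
  match days with
  | [] => []
  | d :: ds => if d ≥ s then ds else d :: removeDayA ds s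

-- the while loop; `cur < len(books)` walks the remaining books, `cur` is the counter
def solveLoopA (rest : List Int) (cur : Int) (s : Int) (days : List Int) : Int :=
  match rest with
  | [] => cur
  | b :: rest' =>
    if days = [] then cur
    else
      let p := if s + b > PySem.List.pyGetD days ((days.length : Int) - 1) 0
               then (0, removeDayA days s) else (s, days)
      let s2 := p.1 + b
      let days2 := p.2
      if days2 = [] ∨ s2 > PySem.List.pyGetD days2 ((days2.length : Int) - 1) 0 then cur
      else solveLoopA rest' (cur + 1) s2 days2

def solve (books : List Int) (days : List Int) : Int :=
  solveLoopA (PySem.List.sorted books (fun x => x) false) 0 0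
             (PySem.List.sorted days (fun x => x) false)

-- ===== PORT B =====
-- hand-written bisect_left from Source B (index mid is in range whenever lo < hi ≤ len)
def blLoop (a : List Int) (x : Int) (lo hi : Nat) : Nat :=
  if lo < hi then
    let mid := (lo + hi) / 2
    if a.getD mid 0 < x then blLoop a x (mid + 1) hi else blLoop a x lo mid
  else lo
termination_by hi - lo
decreasing_by all_goals omega

def bl (a : List Int) (x : Int) : Nat := blLoop a x 0 a.length

-- the `for n, b in enumerate(books)` loop; `total` is len(books) returned at exhaustion
def solveLoopB (total : Int) (items : List (Int × Int)) (s : Int) (d : List Int) : Int :=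
  match items with
  | [] => total
  | (n, b) :: rest =>
    let p := if s + b > PySem.List.pyGetD d (-1) 0
             then (0, let i := bl d s; if i < d.length then d.eraseIdx i else d)
             else (s, d)
    let s2 := p.1 + b
    let d2 := p.2
    if d2 = [] ∨ s2 > PySem.List.pyGetD d2 (-1) 0 then n
    else solveLoopB total rest s2 d2

def solve_alt (books : List Int) (days : List Int) : Int :=
  let bs := PySem.List.sorted books (fun x => x) false
  let ds := PySem.List.sorted days (fun x => x) false
  if ds = [] then 0
  else solveLoopB (bs.length : Int) (PySem.List.enumerate bs 0) 0 ds

-- ===== PRECONDITION & SPEC =====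
def Spec_solve (books : List Int) (days : List Int) (out : Int) : Prop := out = solve_alt books days
instance (books : List Int) (days : List Int) (out : Int) : Decidable (Spec_solve books days out) := by unfold Spec_solve; infer_instance

-- ===== CLAIM (what is proved, stated in full; the proofs are below) =====
def Claim_equal_solve : Prop := ∀ (books : List Int) (days : List Int), Dom_solve books days → Spec_solve books days (solve books days)

-- ===== LEMMAS AND PROOFS =====

-- blLoop returns the unique boundary index: everything below it is < x, everything at/above is ≥ x
-- sortedness as index monotonicity
theorem mono_of_pairwise (a : List Int) (hs : List.Pairwise (· ≤ ·) a)
    {i j : Nat} (hij : i ≤ j) (hj : j < a.length) : a[i] ≤ a[j] := by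
  rcases Nat.lt_or_ge i j with h | h
  · exact List.pairwise_iff_getElem.mp hs i j (Nat.lt_of_lt_of_le h (Nat.le_of_lt hj)) hj h
  · have : i = j := Nat.le_antisymm hij h
    subst this; exact le_refl _

theorem blLoop_spec (a : List Int) (x : Int)
    (hs : List.Pairwise (· ≤ ·) a) :
    ∀ (n lo hi : Nat), hi - lo ≤ n → lo ≤ hi → hi ≤ a.length →
    (∀ j (hj : j < a.length), j < lo → a[j] < x) →
    (∀ j (hj : j < a.length), hi ≤ j → x ≤ a[j]) →
    blLoop a x lo hi ≤ a.length ∧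
    (∀ j (hj : j < a.length), j < blLoop a x lo hi → a[j] < x) ∧
    (∀ j (hj : j < a.length), blLoop a x lo hi ≤ j → x ≤ a[j]) := by
  intro n
  induction n with
  | zero =>
    intro lo hi hn hle hlen hbelow habove
    have heq : lo = hi := by omega
    rw [blLoop]
    simp only [heq, Nat.lt_irrefl, if_false]
    exact ⟨by omega, fun j hj hjlt => hbelow j hj (by omega),
           fun j hj hjge => habove j hj (by omega)⟩
  | succ n ih =>
    intro lo hi hn hle hlen hbelow habove
    by_cases hlt : lo < hi
    · rw [blLoop]
      simp only [hlt, if_true]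
      have hmidlt : (lo + hi) / 2 < hi := by omega
      have hmidge : lo ≤ (lo + hi) / 2 := by omega
      have hmidlen : (lo + hi) / 2 < a.length := by omega
      rw [List.getD_eq_getElem a 0 hmidlen]
      by_cases hx : a[(lo + hi) / 2] < x
      · simp only [hx, if_true]
        exact ih ((lo + hi) / 2 + 1) hi (by omega) (by omega) hlen
          (fun j hj hjlt => lt_of_le_of_lt (mono_of_pairwise a hs (by omega) hmidlen) hx)
          habove
      · simp only [hx, if_false]
        exact ih lo ((lo + hi) / 2) (by omega) (by omega) (by omega)
          hbelow
          (fun j hj hjge =>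
            le_trans (not_lt.mp hx) (mono_of_pairwise a hs hjge hj))
    · rw [blLoop]
      simp only [hlt, if_false]
      have heq : lo = hi := by omega
      exact ⟨by omega, fun j hj hjlt => hbelow j hj hjlt,
             fun j hj hjge => habove j hj (by omega)⟩

theorem bl_spec (a : List Int) (x : Int) (hs : List.Pairwise (· ≤ ·) a) :
    bl a x ≤ a.length ∧
    (∀ j (hj : j < a.length), j < bl a x → a[j] < x) ∧
    (∀ j (hj : j < a.length), bl a x ≤ j → x ≤ a[j]) := by
  exact blLoop_spec a x hs a.length 0 a.length (by omega) (by omega) (le_refl _)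
    (fun j hj h => absurd h (Nat.not_lt_zero j))
    (fun j hj h => absurd (Nat.lt_of_lt_of_le hj h) (Nat.lt_irrefl _))

-- any boundary index gives the same erase as A's scan-and-remove
theorem erase_spec (s : Int) : ∀ (d : List Int) (k : Nat), k ≤ d.length →
    (∀ j (hj : j < d.length), j < k → d[j] < s) →
    (∀ j (hj : j < d.length), k ≤ j → s ≤ d[j]) →
    (if k < d.length then d.eraseIdx k else d) = removeDayA d s := by
  intro d
  induction d with
  | nil =>
    intro k hk _ _
    simp [removeDayA]
  | cons a t ih =>
    intro k hk hbelow habove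
    rw [removeDayA]
    by_cases hsa : a ≥ s
    · have hk0 : k = 0 := by
        by_contra hne
        have h0 : (0:Nat) < k := Nat.pos_of_ne_zero hne
        have := hbelow 0 (by simp) h0
        simp at this
        omega
      subst hk0
      simp [hsa]
    · have hk1 : 1 ≤ k := by
        by_contra hne
        have hk0 : k = 0 := by omega
        have := habove 0 (by simp) (by omega)
        simp at this
        omega
      obtain ⟨k', rfl⟩ : ∃ k', k = k' + 1 := ⟨k - 1, by omega⟩
      have hrec := ih k' (by simpa using hk)
        (fun j hj hjlt => by
          have := hbelow (j+1) (by simpa using Nat.succ_lt_succ hj) (by omega)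
          simpa using this)
        (fun j hj hjge => by
          have := habove (j+1) (by simpa using Nat.succ_lt_succ hj) (by omega)
          simpa using this)
      simp only [hsa, if_false]
      by_cases hlt : k' < t.length
      · rw [if_pos (by simpa using Nat.succ_lt_succ hlt)]
        rw [List.eraseIdx_cons_succ]
        rw [if_pos hlt] at hrec
        exact congrArg (a :: ·) hrec
      · rw [if_neg (by simp; omega)]
        rw [if_neg hlt] at hrec
        exact congrArg (a :: ·) hrec

-- the boundary index is unique, hence B's bisect+pop equals A's scan-and-remove
theorem rm_eq (d : List Int) (hs : List.Pairwise (· ≤ ·) d) (s : Int) :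
    (if bl d s < d.length then d.eraseIdx (bl d s) else d) = removeDayA d s := by
  obtain ⟨h1, h2, h3⟩ := bl_spec d s hs
  exact erase_spec s d (bl d s) h1 h2 h3

theorem removeDayA_sublist : ∀ (d : List Int) (s : Int), (removeDayA d s).Sublist d := by
  intro d s
  induction d with
  | nil => simp [removeDayA]
  | cons a t ih =>
    rw [removeDayA]
    by_cases h : a ≥ s
    · simp only [h, if_true]
      exact List.sublist_cons_self a t
    · simp only [h, if_false]
      exact List.Sublist.cons₂ a ih

theorem removeDayA_sorted (d : List Int) (hs : List.Pairwise (· ≤ ·) d) (s : Int) :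
    List.Pairwise (· ≤ ·) (removeDayA d s) :=
  List.Pairwise.sublist (removeDayA_sublist d s) hs

-- A's days[len(days)-1] and B's d[-1] are the same element of a nonempty list
theorem last_eq (d : List Int) (h : d ≠ []) :
    PySem.List.pyGetD d ((d.length : Int) - 1) 0 = PySem.List.pyGetD d (-1) 0 := by
  have hlen : 0 < d.length := List.length_pos_of_ne_nil h
  rw [PySem.List.pyGetD_neg_one d 0 h]
  rw [PySem.List.pyGetD_eq_getElem d 0 (by omega) (by omega)]
  rw [List.getLast_eq_getElem h]
  congr 1
  omega

theorem loop_eq (rest : List Int) :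
    ∀ (cur s : Int) (d : List Int), List.Pairwise (· ≤ ·) d → d ≠ [] →
    solveLoopA rest cur s d
      = solveLoopB (cur + (rest.length : Int)) (PySem.List.enumerate rest cur) s d := by
  induction rest with
  | nil =>
    intro cur s d hp hne
    rw [PySem.List.enumerate]
    simp [solveLoopA, solveLoopB]
  | cons b rest' ih =>
    intro cur s d hp hne
    rw [PySem.List.enumerate, solveLoopA, solveLoopB]
    rw [if_neg hne]
    rw [last_eq d hne, rm_eq d hp s]
    by_cases hcond : s + b > PySem.List.pyGetD d (-1) 0
    · simp only [if_pos hcond]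
      have hp2 : List.Pairwise (· ≤ ·) (removeDayA d s) := removeDayA_sorted d hp s
      by_cases hne2 : removeDayA d s = []
      · simp [hne2]
      · rw [last_eq _ hne2]
        by_cases hfin : removeDayA d s = [] ∨ 0 + b > PySem.List.pyGetD (removeDayA d s) (-1) 0
        · rw [if_pos hfin, if_pos hfin]
        · rw [if_neg hfin, if_neg hfin]
          rw [ih (cur + 1) (0 + b) (removeDayA d s) hp2 hne2]
          congr 1
          simp only [List.length_cons]
          push_cast
          ring
    · simp only [if_neg hcond]
      rw [last_eq d hne]
      by_cases hfin : d = [] ∨ s + b > PySem.List.pyGetD d (-1) 0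
      · rw [if_pos hfin, if_pos hfin]
      · rw [if_neg hfin, if_neg hfin]
        rw [ih (cur + 1) (s + b) d hp hne]
        congr 1
        simp only [List.length_cons]
        push_cast
        ring

-- ===== VERDICT (by name: the statement is the Claim_ definition above) =====
theorem solve_spec : Claim_equal_solve := by
  intro books days _
  unfold Spec_solve solve solve_alt
  simp only []
  set bs := PySem.List.sorted books (fun x => x) false with hbs
  set ds := PySem.List.sorted days (fun x => x) false with hds
  by_cases h : ds = []
  · rw [if_pos h, h]
    cases bs with
    | nil => simp [solveLoopA]
    | cons b t => simp [solveLoopA]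
  · rw [if_neg h]
    have hp : List.Pairwise (· ≤ ·) ds := by
      have := PySem.List.sorted_pairwise days (fun x => x)
      simpa [hds] using this
    have := loop_eq bs 0 0 ds hp h
    simpa using this
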